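-- pv_equiv track=rewrite | github.com/UTSAVS26/PyVerse | Algorithms_and_Data_Structures/SearchingAlgorithms/BestFirstSearch.py | best_first_search
-- ===== SOURCE A (Python) =====
-- import heapq
--
-- class Node:
--     def __init__(self, name, cost=0):
--         self.name = name
--         self.cost = cost
--
--     def __lt__(self, other):
--         return self.cost < other.cost
--
-- def best_first_search(start, goal, graph):
--     visited = set()
--     priority_queue = []
--
--     heapq.heappush(priority_queue, Node(start))
--
--     while priority_queue:
--         current_node = heapq.heappop(priority_queue)
--
--         if current_node.name == goal:
--             return f"Reached goal: {current_node.name}"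
--
--         if current_node.name in visited:
--             continue
--
--         visited.add(current_node.name)
--
--         for neighbor, cost in graph.get(current_node.name, {}).items():
--             if neighbor not in visited:
--                 heapq.heappush(priority_queue, Node(neighbor, cost))
--
--     return "Goal not reachable"
-- ===== SOURCE B (Python) =====
-- def best_first_search(start, goal, graph):
--     # The heap order never affects the result (only reachability matters),
--     # so a plain FIFO queue of node names replaces the priority queue and Node class.
--     visited = set()
--     queue = [start]
--     while queue:
--         name = queue.pop(0)
--         if name == goal:
--             return f"Reached goal: {name}"
--         if name in visited:
--             continue
--         visited.add(name)
--         for neighbor, _cost in graph.get(name, {}).items():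
--             if neighbor not in visited:
--                 queue.append(neighbor)
--     return "Goal not reachable"
-- ===== Notes on version B (the rewrite author's own statement) =====
-- stated objective: simpler
-- what changed: Drops the Node class and the cost-ordered heapq priority queue entirely and runs a plain FIFO BFS over a queue of node names with a visited set: the pop order never affects the returned string, which only reports whether goal is reachable from start.
import Mathlib
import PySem

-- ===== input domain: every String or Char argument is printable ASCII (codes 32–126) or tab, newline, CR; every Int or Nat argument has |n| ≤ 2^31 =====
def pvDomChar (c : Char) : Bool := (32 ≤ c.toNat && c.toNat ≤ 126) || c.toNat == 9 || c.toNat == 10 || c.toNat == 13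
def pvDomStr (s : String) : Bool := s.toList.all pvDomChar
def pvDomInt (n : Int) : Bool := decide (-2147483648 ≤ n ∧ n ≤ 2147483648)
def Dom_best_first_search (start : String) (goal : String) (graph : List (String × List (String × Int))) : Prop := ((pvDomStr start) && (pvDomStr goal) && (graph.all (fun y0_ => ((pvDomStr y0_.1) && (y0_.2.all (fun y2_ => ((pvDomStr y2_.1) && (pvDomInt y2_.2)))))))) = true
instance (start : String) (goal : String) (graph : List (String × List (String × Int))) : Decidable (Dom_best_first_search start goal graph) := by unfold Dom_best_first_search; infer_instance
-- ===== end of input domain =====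

-- B replaces A's cost-ordered priority queue (Node class + heapq) by a plain FIFO queue of node
-- names: the pop order never affects the returned string, only reachability does (objective: simpler).

-- ===== PORT A =====
-- graph.get(name, {}) : first-match association-list lookup (PySem.Dict semantics)
def pvAdj (graph : List (String × List (String × Int))) (u : String) : List (String × Int) :=
  PySem.Dict.getD (PySem.Dict.mk graph) u []

-- ghost candidate pool used only for the termination measure of the loops (never affects the value):
-- every name ever put on a queue is `start` or some neighbour name occurring in `graph`.
def pvAllNames (start : String) (graph : List (String × List (String × Int))) : List String :=
  start :: graph.flatMap (fun kv => kv.2.map Prod.fst)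

lemma pvAdj_cons (k : String) (v : List (String × Int))
    (rest : List (String × List (String × Int))) (u : String) :
    pvAdj ((k, v) :: rest) u = if (k == u) then v else pvAdj rest u := by
  simp only [pvAdj, PySem.Dict.getD, PySem.Dict.get?_mk_cons]
  split <;> rfl

lemma pvAdj_names_sub (start : String) (graph : List (String × List (String × Int))) (u : String) :
    ∀ p ∈ pvAdj graph u, p.1 ∈ pvAllNames start graph := by
  intro p hp
  have hkv : ∃ kv ∈ graph, p ∈ kv.2 := by
    induction graph with
    | nil => cases hp
    | cons kv rest ih =>
      obtain ⟨k, v⟩ := kv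
      rw [pvAdj_cons] at hp
      by_cases h : (k == u) = true
      · rw [if_pos h] at hp
        exact ⟨(k, v), List.mem_cons_self .., hp⟩
      · rw [if_neg h] at hp
        obtain ⟨kv', h1, h2⟩ := ih hp
        exact ⟨kv', List.mem_cons_of_mem _ h1, h2⟩
  obtain ⟨kv, h1, h2⟩ := hkv
  exact List.mem_cons_of_mem _ (List.mem_flatMap.2 ⟨kv, h1, List.mem_map_of_mem h2⟩)

-- heapq.heappush on the Node heap, modelled as a cost-ordered priority queue (ordered insert by
-- cost = Node.__lt__); pop is taking the head, a minimum-cost element, as heapq.heappop returns.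
-- (For equal costs CPython's binary heap may pop another minimal node — unobservable in the
-- returned string, which the proof establishes.)
def pvHeapPush (h : List (String × Int)) (n : String × Int) : List (String × Int) :=
  match h with
  | [] => [n]
  | m :: t => if n.2 < m.2 then n :: m :: t else m :: pvHeapPush t n

lemma pv_mem_heapPush (h : List (String × Int)) (n p : String × Int) :
    p ∈ pvHeapPush h n ↔ p ∈ h ∨ p = n := by
  induction h with
  | nil => simp [pvHeapPush]
  | cons m t ih =>
    simp only [pvHeapPush]
    split <;> simp [ih] <;> tauto

lemma pv_mem_foldl_heapPush (c : String × Int → Bool) (l init : List (String × Int)) (p : String × Int) :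
    p ∈ l.foldl (fun q nb => if c nb then pvHeapPush q nb else q) init ↔
      p ∈ init ∨ (p ∈ l ∧ c p = true) := by
  induction l generalizing init with
  | nil => simp
  | cons a t ih =>
    rw [List.foldl_cons, ih]
    by_cases h : c a = true
    · rw [if_pos h]
      constructor
      · rintro (h' | h')
        · rcases (pv_mem_heapPush _ _ _).1 h' with h'' | rfl
          · exact Or.inl h''
          · exact Or.inr ⟨List.mem_cons_self .., h⟩
        · exact Or.inr ⟨List.mem_cons_of_mem _ h'.1, h'.2⟩
      · rintro (h' | ⟨hm, hc⟩)
        · exact Or.inl ((pv_mem_heapPush _ _ _).2 (Or.inl h'))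
        · rcases List.mem_cons.1 hm with rfl | hm'
          · exact Or.inl ((pv_mem_heapPush _ _ _).2 (Or.inr rfl))
          · exact Or.inr ⟨hm', hc⟩
    · rw [if_neg h]
      constructor
      · rintro (h' | h')
        · exact Or.inl h'
        · exact Or.inr ⟨List.mem_cons_of_mem _ h'.1, h'.2⟩
      · rintro (h' | ⟨hm, hc⟩)
        · exact Or.inl h'
        · rcases List.mem_cons.1 hm with rfl | hm'
          · exact absurd hc h
          · exact Or.inr ⟨hm', hc⟩

lemma pv_filter_length_le {α : Type} (p q : α → Bool) (l : List α)
    (h : ∀ a, q a = true → p a = true) : (l.filter q).length ≤ (l.filter p).length :=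
  (List.monotone_filter_right l h).length_le

lemma pv_filter_length_lt {α : Type} (p q : α → Bool) (l : List α)
    (h : ∀ a, q a = true → p a = true) (x : α) (hx : x ∈ l)
    (hpx : p x = true) (hqx : q x = false) :
    (l.filter q).length < (l.filter p).length := by
  induction l with
  | nil => cases hx
  | cons a t ih =>
    simp only [List.filter_cons]
    rcases List.mem_cons.1 hx with rfl | hxt
    · rw [hqx, hpx]
      simpa using Nat.lt_succ_of_le (pv_filter_length_le p q t h)
    · cases hqa : q a with
      | true => rw [h a hqa]; simpa using ih hxt
      | false =>
        cases hpa : p a with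
        | true => simpa using Nat.lt_succ_of_lt (ih hxt)
        | false => simpa using ih hxt

lemma pvUnvisited_lt (C : List String) (V : PySem.Set String) (u : String)
    (hu : u ∈ C) (hv : PySem.Set.contains V u = false) :
    (C.filter (fun c => !PySem.Set.contains (PySem.Set.add V u) c)).length
      < (C.filter (fun c => !PySem.Set.contains V c)).length := by
  have himp : ∀ a, (!PySem.Set.contains (PySem.Set.add V u) a) = true →
      (!PySem.Set.contains V a) = true := by
    intro a ha
    cases hc : PySem.Set.contains V a
    · rfl
    · rw [(PySem.Set.contains_iff _ _).2 ((PySem.Set.mem_add V u a).2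
        (Or.inl ((PySem.Set.contains_iff _ _).1 hc)))] at ha
      cases ha
  exact pv_filter_length_lt _ _ C himp u hu (by show (!PySem.Set.contains V u) = true; rw [hv]; rfl)
    (by show (!PySem.Set.contains (PySem.Set.add V u) u) = false
        rw [(PySem.Set.contains_iff _ _).2 ((PySem.Set.mem_add V u u).2 (Or.inr rfl))]; rfl)

-- A's while-loop. `C`/`hC`/`hq` are ghost data for termination only (C = pvAllNames start graph):
-- the visited set can only grow inside the finite pool C, and a pop with no expansion shrinks the queue.
def pvLoopA (goal : String) (graph : List (String × List (String × Int))) (C : List String)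
    (visited : PySem.Set String) (pq : List (String × Int))
    (hC : ∀ u : String, ∀ p ∈ pvAdj graph u, p.1 ∈ C) (hq : ∀ p ∈ pq, p.1 ∈ C) : String :=
  match pq with
  | [] => "Goal not reachable"
  | cur :: rest =>
    if cur.1 = goal then
      "Reached goal: " ++ cur.1
    else if hvis : PySem.Set.contains visited cur.1 = true then
      pvLoopA goal graph C visited rest hC (fun p hp => hq p (List.mem_cons_of_mem _ hp))
    else
      pvLoopA goal graph C (PySem.Set.add visited cur.1)
        ((pvAdj graph cur.1).foldl
          (fun q nb => if !PySem.Set.contains (PySem.Set.add visited cur.1) nb.1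
                       then pvHeapPush q nb else q) rest)
        hC
        (fun p hp => by
          rcases (pv_mem_foldl_heapPush _ _ _ p).1 hp with h | h
          · exact hq p (List.mem_cons_of_mem _ h)
          · exact hC cur.1 p h.1)
  termination_by ((C.filter (fun c => !PySem.Set.contains visited c)).length, pq.length)
  decreasing_by
  · exact Prod.Lex.right _ (Nat.lt_succ_self _)
  · exact Prod.Lex.left _ _
      (pvUnvisited_lt C visited cur.1 (hq cur (List.mem_cons_self ..)) (by simpa using hvis))

def best_first_search (start : String) (goal : String)
    (graph : List (String × List (String × Int))) : String :=
  pvLoopA goal graph (pvAllNames start graph) PySem.Set.empty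
    (pvHeapPush [] (start, 0))
    (fun u p hp => pvAdj_names_sub start graph u p hp)
    (fun p hp => by
      simp only [pvHeapPush, List.mem_singleton] at hp
      subst hp; exact List.mem_cons_self ..)

-- ===== PORT B =====
-- B's while-loop over a FIFO queue of names; same ghost termination data.
def pvLoopB (goal : String) (graph : List (String × List (String × Int))) (C : List String)
    (visited : PySem.Set String) (queue : List String)
    (hC : ∀ u : String, ∀ p ∈ pvAdj graph u, p.1 ∈ C) (hq : ∀ n ∈ queue, n ∈ C) : String :=
  match queue with
  | [] => "Goal not reachable"
  | name :: rest =>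
    if name = goal then
      "Reached goal: " ++ name
    else if hvis : PySem.Set.contains visited name = true then
      pvLoopB goal graph C visited rest hC (fun n hn => hq n (List.mem_cons_of_mem _ hn))
    else
      pvLoopB goal graph C (PySem.Set.add visited name)
        ((pvAdj graph name).foldl
          (fun q nb => if !PySem.Set.contains (PySem.Set.add visited name) nb.1
                       then q ++ [nb.1] else q) rest)
        hC
        (fun n hn => by
          rw [PySem.List.foldl_append_if] at hn
          rcases List.mem_append.1 hn with h | h
          · exact hq n (List.mem_cons_of_mem _ h)
          · obtain ⟨p, hp, rfl⟩ := List.mem_map.1 h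
            exact hC name p (List.mem_filter.1 hp).1)
  termination_by ((C.filter (fun c => !PySem.Set.contains visited c)).length, queue.length)
  decreasing_by
  · exact Prod.Lex.right _ (Nat.lt_succ_self _)
  · exact Prod.Lex.left _ _
      (pvUnvisited_lt C visited name (hq name (List.mem_cons_self ..)) (by simpa using hvis))

def best_first_search_alt (start : String) (goal : String)
    (graph : List (String × List (String × Int))) : String :=
  pvLoopB goal graph (pvAllNames start graph) PySem.Set.empty [start]
    (fun u p hp => pvAdj_names_sub start graph u p hp)
    (fun n hn => by
      simp only [List.mem_singleton] at hn
      subst hn; exact List.mem_cons_self ..)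

-- ===== PRECONDITION & SPEC =====
def Spec_best_first_search (start : String) (goal : String) (graph : List (String × List (String × Int))) (out : String) : Prop := out = best_first_search_alt start goal graph
instance (start : String) (goal : String) (graph : List (String × List (String × Int))) (out : String) : Decidable (Spec_best_first_search start goal graph out) := by unfold Spec_best_first_search; infer_instance

-- ===== CLAIM (what is proved, stated in full; the proofs are below) =====
def Claim_equal_best_first_search : Prop := ∀ (start : String) (goal : String) (graph : List (String × List (String × Int))), Dom_best_first_search start goal graph → Spec_best_first_search start goal graph (best_first_search start goal graph)

-- ===== LEMMAS AND PROOFS =====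

lemma pv_contains_false {V : PySem.Set String} {u : String}
    (h : PySem.Set.contains V u = false) : u ∉ V := by
  intro hm
  rw [(PySem.Set.contains_iff V u).2 hm] at h
  cases h

lemma pv_not_mem_contains {V : PySem.Set String} {u : String} (h : u ∉ V) :
    PySem.Set.contains V u = false := by
  cases hc : PySem.Set.contains V u
  · rfl
  · exact absurd ((PySem.Set.contains_iff V u).1 hc) h

-- the two possible result strings are distinct
lemma pv_res_ne (g : String) : "Reached goal: " ++ g ≠ "Goal not reachable" := by
  intro h
  have := congrArg String.toList h
  simp at this

-- an edge of the search: from an unvisited node to one of its neighbours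
def pvEdge (graph : List (String × List (String × Int))) (V : PySem.Set String)
    (a b : String) : Prop :=
  a ∉ V ∧ b ∈ (pvAdj graph a).map Prod.fst

-- goal is reachable from some frontier element without expanding a visited node
def pvReach (graph : List (String × List (String × Int))) (V : PySem.Set String)
    (F : List String) (g : String) : Prop :=
  ∃ f ∈ F, Relation.ReflTransGen (pvEdge graph V) f g

lemma pv_stuck {graph : List (String × List (String × Int))} {V : PySem.Set String}
    {f g : String} (h : Relation.ReflTransGen (pvEdge graph V) f g) (hf : f ∈ V) : f = g := by
  rcases h.cases_head with rfl | ⟨c, ⟨hfV, _⟩, _⟩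
  · rfl
  · exact absurd hf hfV

lemma pv_mono {graph : List (String × List (String × Int))} {V V' : PySem.Set String}
    (hVV' : ∀ x : String, x ∈ V → x ∈ V') {f g : String}
    (h : Relation.ReflTransGen (pvEdge graph V') f g) :
    Relation.ReflTransGen (pvEdge graph V) f g :=
  Relation.ReflTransGen.mono (fun a _b hab => ⟨fun ha => hab.1 (hVV' a ha), hab.2⟩) h

lemma pv_surgery {graph : List (String × List (String × Int))} {V : PySem.Set String}
    {u goal f : String}
    (h : Relation.ReflTransGen (pvEdge graph V) f goal)
    (hgoal : goal ∉ PySem.Set.add V u) :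
    Relation.ReflTransGen (pvEdge graph (PySem.Set.add V u)) f goal ∨
      ∃ b, b ∈ (pvAdj graph u).map Prod.fst ∧ b ∉ PySem.Set.add V u ∧
        Relation.ReflTransGen (pvEdge graph (PySem.Set.add V u)) b goal := by
  induction h using Relation.ReflTransGen.head_induction_on with
  | refl => exact Or.inl Relation.ReflTransGen.refl
  | head hac _ ih =>
    rename_i a c _
    rcases ih with ih | ih
    · by_cases hau : a = u
      · subst hau
        by_cases hc : c ∈ PySem.Set.add V a
        · exact absurd (pv_stuck ih hc ▸ hc) hgoal
        · exact Or.inr ⟨c, hac.2, hc, ih⟩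
      · refine Or.inl (Relation.ReflTransGen.head ⟨?_, hac.2⟩ ih)
        intro ha
        rcases (PySem.Set.mem_add V u a).1 ha with h' | h'
        · exact hac.1 h'
        · exact hau h'
    · exact Or.inr ih

lemma pv_skip {graph : List (String × List (String × Int))} {V : PySem.Set String}
    {u goal : String} {rest : List String} (hu : u ∈ V) (hug : u ≠ goal) :
    pvReach graph V (u :: rest) goal ↔ pvReach graph V rest goal := by
  constructor
  · rintro ⟨f, hf, p⟩
    rcases List.mem_cons.1 hf with rfl | hf'
    · exact absurd (pv_stuck p hu) hug
    · exact ⟨f, hf', p⟩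
  · rintro ⟨f, hf, p⟩
    exact ⟨f, List.mem_cons_of_mem _ hf, p⟩

lemma pv_exchange {graph : List (String × List (String × Int))} {V : PySem.Set String}
    {u goal : String} {rest F' : List String}
    (hu : u ∉ V) (hug : u ≠ goal) (hgoal : goal ∉ PySem.Set.add V u)
    (hF' : ∀ x, x ∈ F' ↔ x ∈ rest ∨
      (x ∈ (pvAdj graph u).map Prod.fst ∧ x ∉ PySem.Set.add V u)) :
    pvReach graph V (u :: rest) goal ↔ pvReach graph (PySem.Set.add V u) F' goal := by
  constructor
  · rintro ⟨f, hf, p⟩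
    rcases pv_surgery p hgoal with q | ⟨b, hb1, hb2, qb⟩
    · rcases List.mem_cons.1 hf with rfl | hf'
      · exact absurd (pv_stuck q ((PySem.Set.mem_add V f f).2 (Or.inr rfl))) hug
      · exact ⟨f, (hF' f).2 (Or.inl hf'), q⟩
    · exact ⟨b, (hF' b).2 (Or.inr ⟨hb1, hb2⟩), qb⟩
  · rintro ⟨f, hf, p⟩
    have hsub : ∀ x : String, x ∈ V → x ∈ PySem.Set.add V u :=
      fun x hx => (PySem.Set.mem_add V u x).2 (Or.inl hx)
    have p' : Relation.ReflTransGen (pvEdge graph V) f goal := pv_mono hsub p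
    rcases (hF' f).1 hf with hf' | ⟨hnb, _⟩
    · exact ⟨f, List.mem_cons_of_mem _ hf', p'⟩
    · exact ⟨u, List.mem_cons_self .., Relation.ReflTransGen.head ⟨hu, hnb⟩ p'⟩

lemma pv_goal_not_in_add {V : PySem.Set String} {u goal : String}
    (hg : goal ∉ V) (hug : u ≠ goal) : goal ∉ PySem.Set.add V u := by
  intro h
  rcases (PySem.Set.mem_add V u goal).1 h with h' | h'
  · exact hg h'
  · exact hug h'.symm

-- frontier-name description of A's push fold
lemma pv_namesA (visited' : PySem.Set String) (adj rest : List (String × Int)) (x : String) :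
    x ∈ (adj.foldl (fun q nb => if !PySem.Set.contains visited' nb.1
            then pvHeapPush q nb else q) rest).map Prod.fst ↔
      x ∈ rest.map Prod.fst ∨ (x ∈ adj.map Prod.fst ∧ x ∉ visited') := by
  simp only [List.mem_map]
  constructor
  · rintro ⟨p, hp, rfl⟩
    rcases (pv_mem_foldl_heapPush _ _ _ p).1 hp with h | ⟨h1, h2⟩
    · exact Or.inl ⟨p, h, rfl⟩
    · refine Or.inr ⟨⟨p, h1, rfl⟩, ?_⟩
      intro hmem
      rw [(PySem.Set.contains_iff _ _).2 hmem] at h2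
      cases h2
  · rintro (⟨p, hp, rfl⟩ | ⟨⟨p, hp, rfl⟩, hnv⟩)
    · exact ⟨p, (pv_mem_foldl_heapPush _ _ _ p).2 (Or.inl hp), rfl⟩
    · refine ⟨p, (pv_mem_foldl_heapPush _ _ _ p).2 (Or.inr ⟨hp, ?_⟩), rfl⟩
      rw [pv_not_mem_contains hnv]; rfl

-- frontier-name description of B's append fold
lemma pv_namesB (visited' : PySem.Set String) (adj : List (String × Int)) (rest : List String)
    (x : String) :
    x ∈ (adj.foldl (fun q nb => if !PySem.Set.contains visited' nb.1
            then q ++ [nb.1] else q) rest) ↔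
      x ∈ rest ∨ (x ∈ adj.map Prod.fst ∧ x ∉ visited') := by
  rw [PySem.List.foldl_append_if]
  simp only [List.mem_append, List.mem_map, List.mem_filter]
  constructor
  · rintro (h | ⟨p, ⟨hp, hc⟩, rfl⟩)
    · exact Or.inl h
    · exact Or.inr ⟨⟨p, hp, rfl⟩, pv_contains_false (by simpa using hc)⟩
  · rintro (h | ⟨⟨p, hp, rfl⟩, hnv⟩)
    · exact Or.inl h
    · refine Or.inr ⟨p, ⟨hp, ?_⟩, rfl⟩
      rw [pv_not_mem_contains hnv]; rfl

lemma pvLoopA_char (goal : String) (graph : List (String × List (String × Int))) (C : List String)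
    (hC : ∀ u : String, ∀ p ∈ pvAdj graph u, p.1 ∈ C) :
    ∀ (visited : PySem.Set String) (pq : List (String × Int)) (hq : ∀ p ∈ pq, p.1 ∈ C),
      goal ∉ visited →
      (pvLoopA goal graph C visited pq hC hq = "Reached goal: " ++ goal ∨
         pvLoopA goal graph C visited pq hC hq = "Goal not reachable") ∧
      (pvLoopA goal graph C visited pq hC hq = "Reached goal: " ++ goal ↔
         pvReach graph visited (pq.map Prod.fst) goal) := by
  intro visited pq hq
  induction visited, pq, hq using pvLoopA.induct goal graph C hC with
  | case1 visited hq _ =>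
    intro hg
    rw [pvLoopA]
    refine ⟨Or.inr rfl, ?_⟩
    constructor
    · intro h; exact absurd h.symm (pv_res_ne goal)
    · rintro ⟨f, hf, -⟩; cases hf
  | case2 visited cur rest hq hcur _ =>
    intro hg
    rw [pvLoopA]
    simp only [if_pos hcur]
    constructor
    · exact Or.inl (by rw [hcur])
    · constructor
      · intro _
        refine ⟨cur.1, List.mem_map_of_mem (List.mem_cons_self ..), ?_⟩
        rw [hcur]
      · intro _
        rw [hcur]
  | case3 visited cur rest hq hcur hvis _ ih =>
    intro hg
    rw [pvLoopA]
    simp only [if_neg hcur, dif_pos hvis]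
    obtain ⟨hshape, hiff⟩ := ih hg
    refine ⟨hshape, hiff.trans ?_⟩
    rw [List.map_cons]
    exact (pv_skip ((PySem.Set.contains_iff _ _).1 hvis) hcur).symm
  | case4 visited cur rest hq hcur hvis _ ih =>
    intro hg
    have hunv : cur.1 ∉ visited := fun hm => hvis ((PySem.Set.contains_iff _ _).2 hm)
    have hg' : goal ∉ PySem.Set.add visited cur.1 :=
      pv_goal_not_in_add hg (fun h => hcur h)
    rw [pvLoopA]
    simp only [if_neg hcur, dif_neg hvis]
    obtain ⟨hshape, hiff⟩ := ih hg'
    simp only [dite_eq_ite] at hshape hiff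
    refine ⟨hshape, hiff.trans ?_⟩
    rw [List.map_cons]
    exact (pv_exchange hunv (fun h => hcur h) hg'
      (fun x => pv_namesA (PySem.Set.add visited cur.1) (pvAdj graph cur.1) rest x)).symm

lemma pvLoopB_char (goal : String) (graph : List (String × List (String × Int))) (C : List String)
    (hC : ∀ u : String, ∀ p ∈ pvAdj graph u, p.1 ∈ C) :
    ∀ (visited : PySem.Set String) (queue : List String) (hq : ∀ n ∈ queue, n ∈ C),
      goal ∉ visited →
      (pvLoopB goal graph C visited queue hC hq = "Reached goal: " ++ goal ∨
         pvLoopB goal graph C visited queue hC hq = "Goal not reachable") ∧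
      (pvLoopB goal graph C visited queue hC hq = "Reached goal: " ++ goal ↔
         pvReach graph visited queue goal) := by
  intro visited queue hq
  induction visited, queue, hq using pvLoopB.induct goal graph C hC with
  | case1 visited hq _ =>
    intro hg
    rw [pvLoopB]
    refine ⟨Or.inr rfl, ?_⟩
    constructor
    · intro h; exact absurd h.symm (pv_res_ne goal)
    · rintro ⟨f, hf, -⟩; cases hf
  | case2 visited rest hq _ =>
    intro hg
    rw [pvLoopB]
    refine ⟨Or.inl (by simp), ?_⟩
    constructor
    · intro _
      exact ⟨goal, List.mem_cons_self .., Relation.ReflTransGen.refl⟩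
    · intro _
      simp
  | case3 visited name rest hq hname hvis _ ih =>
    intro hg
    rw [pvLoopB]
    simp only [if_neg hname, dif_pos hvis]
    obtain ⟨hshape, hiff⟩ := ih hg
    refine ⟨hshape, hiff.trans ?_⟩
    exact (pv_skip ((PySem.Set.contains_iff _ _).1 hvis) hname).symm
  | case4 visited name rest hq hname hvis _ ih =>
    intro hg
    have hunv : name ∉ visited := fun hm => hvis ((PySem.Set.contains_iff _ _).2 hm)
    have hg' : goal ∉ PySem.Set.add visited name :=
      pv_goal_not_in_add hg (fun h => hname h)
    rw [pvLoopB]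
    simp only [if_neg hname, dif_neg hvis]
    obtain ⟨hshape, hiff⟩ := ih hg'
    simp only [dite_eq_ite] at hshape hiff
    refine ⟨hshape, hiff.trans ?_⟩
    exact (pv_exchange hunv (fun h => hname h) hg'
      (fun x => pv_namesB (PySem.Set.add visited name) (pvAdj graph name) rest x)).symm

-- ===== VERDICT (by name: the statement is the Claim_ definition above) =====
theorem best_first_search_spec : Claim_equal_best_first_search := by
  intro start goal graph _
  unfold Spec_best_first_search best_first_search best_first_search_alt
  have hg : goal ∉ (PySem.Set.empty : PySem.Set String) := List.not_mem_nil
  obtain ⟨shapeA, iffA⟩ := pvLoopA_char goal graph (pvAllNames start graph) _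
    PySem.Set.empty (pvHeapPush [] (start, 0)) _ hg
  obtain ⟨shapeB, iffB⟩ := pvLoopB_char goal graph (pvAllNames start graph) _
    PySem.Set.empty [start] _ hg
  have hinit : (pvHeapPush [] (start, (0:Int))).map Prod.fst = [start] := rfl
  rw [hinit] at iffA
  rcases shapeA with hA | hA <;> rcases shapeB with hB | hB
  · rw [hA, hB]
  · have h2 := iffB.2 (iffA.1 hA)
    rw [hB] at h2
    exact absurd h2.symm (pv_res_ne goal)
  · have h2 := iffA.2 (iffB.1 hB)
    rw [hA] at h2
    exact absurd h2.symm (pv_res_ne goal)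
  · rw [hA, hB]
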